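-- pv_equiv track=rewrite | github.com/Xpra-org/xpra | xpra/util/parsing.py | parse_scaling_value
-- ===== SOURCE A (Python) =====
-- def parse_scaling_value(v) -> tuple[int, int] | None:
--     if not v:
--         return None
--     if v.endswith("%"):
--         num = int(v[:-1])
--         denom = 100
--         for div in (2, 5):
--             while (num % div) == 0 and (denom % div) == 0:
--                 num = num // div
--                 denom = denom // div
--         return num, denom
--     values = v.replace("/", ":").replace(",", ":").split(":", 1)
--     values = [int(x) for x in values]
--     for x in values:
--         assert x > 0, f"invalid scaling value {x}"
--     if len(values) == 1:
--         ret = 1, values[0]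
--     else:
--         assert values[0] <= values[1], "cannot upscale"
--         ret = values[0], values[1]
--     return ret
-- ===== SOURCE B (Python) =====
-- def parse_scaling_value(v):
--     if not v:
--         return None
--     if v.endswith("%"):
--         num = int(v[:-1])
--         a, b = abs(num), 100
--         while b:
--             a, b = b, a % b
--         return num // a, 100 // a
--     nums = [int(x) for x in v.replace("/", ":").replace(",", ":").split(":", 1)]
--     assert all(x > 0 for x in nums), "invalid scaling value"
--     x, y = ([1] + nums)[-2:]
--     assert x <= y, "cannot upscale"
--     return x, y
-- ===== Notes on version B (the rewrite author's own statement) =====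
-- stated objective: alternative
-- what changed: The '%' branch's nested trial-division loop over divisors (2,5) is replaced by a single Euclid gcd followed by two exact divisions, and the len-1/len-2 ratio branch is replaced by padding with 1 and taking the last two elements, with one uniform x<=y check.
import Mathlib
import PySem

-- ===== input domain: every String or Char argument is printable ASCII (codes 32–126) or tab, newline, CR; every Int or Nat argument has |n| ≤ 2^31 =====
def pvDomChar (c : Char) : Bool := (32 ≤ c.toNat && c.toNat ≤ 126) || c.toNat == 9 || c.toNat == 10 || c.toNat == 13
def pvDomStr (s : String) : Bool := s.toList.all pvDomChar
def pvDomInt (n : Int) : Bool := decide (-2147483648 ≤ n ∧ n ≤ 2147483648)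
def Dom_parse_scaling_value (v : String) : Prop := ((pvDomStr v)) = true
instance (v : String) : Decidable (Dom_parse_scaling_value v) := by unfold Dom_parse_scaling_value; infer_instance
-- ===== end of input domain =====

-- B replaces A's trial-division reduction loop by a plain Euclid gcd and the len-1/len-2
-- branch by pad-and-slice; equivalence is claimed on Pre_ (the inputs where A raises no exception).

-- ===== PORT A =====
-- the `while (num % div) == 0 and (denom % div) == 0:` loop; fuel 100 (denom is literally 100
-- at the call and strictly shrinks on every iteration, so the fuel is never exhausted)
def pvReduce : Nat → Int → Int → Int → Int × Int
  | 0, _, num, denom => (num, denom)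
  | fuel+1, div, num, denom =>
    if PySem.Int.mod num div = 0 ∧ PySem.Int.mod denom div = 0 then
      pvReduce fuel div (PySem.Int.floordiv num div) (PySem.Int.floordiv denom div)
    else (num, denom)

def parse_scaling_value (v : String) : Option (Int × Int) :=
  if v = "" then none
  else if PySem.Str.endswith v "%" then
    match PySem.Int.ofStr? (PySem.Str.slice v none (some (-1))) with
    | none => none              -- int() raises ValueError
    | some num =>
      -- for div in (2, 5): while … : num //= div; denom //= div
      let p := pvReduce 100 2 num 100
      let q := pvReduce 100 5 p.1 p.2
      some q
  else
    match ((PySem.Str.splitMax? (PySem.Str.replace (PySem.Str.replace v "/" ":") "," ":") ":" 1).getD []).mapM PySem.Int.ofStr? with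
    | none => none              -- int() raises ValueError
    | some values =>
      if values.all (fun x => decide (0 < x)) then
        if values.length = 1 then
          (PySem.List.pyGet? values 0).elim none (fun x => some (1, x))   -- values[0]
        else
          (PySem.List.pyGet? values 0).elim none (fun a =>
            (PySem.List.pyGet? values 1).elim none (fun b =>   -- values[1] (IndexError = none)
              if a ≤ b then some (a, b) else none))            -- assert values[0] <= values[1]
      else none                 -- assert x > 0 fails

-- ===== PORT B =====
-- `x, y = lst; assert x <= y; return x, y` (unpacking a non-pair raises ValueError = none)
def pvUnpack2 (l : List Int) : Option (Int × Int) :=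
  match l with
  | [x, y] => if x ≤ y then some (x, y) else none
  | _ => none

-- `while b: a, b = b, a % b`; fuel 101 (b is literally 100 at the call and strictly decreases)
def pvGcdLoop : Nat → Int → Int → Int
  | 0, a, _ => a
  | fuel+1, a, b => if b = 0 then a else pvGcdLoop fuel b (PySem.Int.mod a b)

def parse_scaling_value_alt (v : String) : Option (Int × Int) :=
  if v = "" then none
  else if PySem.Str.endswith v "%" then
    (PySem.Int.ofStr? (PySem.Str.slice v none (some (-1)))).elim
      none                      -- int() raises ValueError
      (fun num =>
        let a := pvGcdLoop 101 |num| 100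
        some (PySem.Int.floordiv num a, PySem.Int.floordiv 100 a))
  else
    (((PySem.Str.splitMax? (PySem.Str.replace (PySem.Str.replace v "/" ":") "," ":") ":" 1).getD []).mapM PySem.Int.ofStr?).elim
      none                      -- int() raises ValueError
      (fun nums =>
        if nums.all (fun x => decide (0 < x)) then
          pvUnpack2 (PySem.List.slice ((1 : Int) :: nums) (some (-2)) none)
        else none)              -- assert all(x > 0) fails

-- ===== PRECONDITION & SPEC =====
-- Pre_ excludes exactly the inputs where A raises: a '%' string whose body is not int()-parsable
-- (ValueError), and a ratio string whose pieces fail int() (ValueError), are not all positive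
-- (AssertionError), or name an upscale values[0] > values[1] (AssertionError).
def pvPreRatio (o : Option (List Int)) : Bool :=
  match o with
  | some [a] => decide (0 < a)
  | some [a, b] => decide (0 < a ∧ 0 < b ∧ a ≤ b)
  | _ => false

def Pre_parse_scaling_value (v : String) : Prop :=
  v = "" ∨
  (if PySem.Str.endswith v "%" then
     (PySem.Int.ofStr? (PySem.Str.slice v none (some (-1)))).isSome
   else
     pvPreRatio (((PySem.Str.splitMax? (PySem.Str.replace (PySem.Str.replace v "/" ":") "," ":") ":" 1).getD []).mapM PySem.Int.ofStr?)) = true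
instance (v : String) : Decidable (Pre_parse_scaling_value v) := by unfold Pre_parse_scaling_value; infer_instance

def pvWitness_parse_scaling_value : String := "2:3"

def Spec_parse_scaling_value (v : String) (out : Option (Int × Int)) : Prop := out = parse_scaling_value_alt v
instance (v : String) (out : Option (Int × Int)) : Decidable (Spec_parse_scaling_value v out) := by unfold Spec_parse_scaling_value; infer_instance

-- ===== CLAIM (what is proved, stated in full; the proofs are below) =====
def Claim_equal_parse_scaling_value : Prop := ∀ (v : String), Dom_parse_scaling_value v → Pre_parse_scaling_value v → Spec_parse_scaling_value v (parse_scaling_value v)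

-- ===== LEMMAS AND PROOFS =====

-- one iteration of A's reduction loop, both operands divisible
lemma pvReduce_step (f : Nat) (div k denom : Int) (h0 : 0 < div) (hd : div ∣ denom) :
    pvReduce (f+1) div (div * k) denom = pvReduce f div k (denom / div) := by
  have h1 : PySem.Int.mod (div * k) div = 0 := (PySem.Int.mod_eq_zero_iff_dvd _ _).2 ⟨k, rfl⟩
  have h2 : PySem.Int.mod denom div = 0 := (PySem.Int.mod_eq_zero_iff_dvd _ _).2 hd
  simp [pvReduce, h1, h2, PySem.Int.floordiv_eq_ediv_of_pos h0,
    Int.mul_ediv_cancel_left k (by omega : div ≠ 0)]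

-- the loop stops when div no longer divides both
lemma pvReduce_stop (f : Nat) (div num denom : Int) (h : ¬ (div ∣ num) ∨ ¬ (div ∣ denom)) :
    pvReduce (f+1) div num denom = (num, denom) := by
  rcases h with h | h <;>
    simp [pvReduce, PySem.Int.mod_eq_zero_iff_dvd, h]

-- full characterisation of the div=2 pass starting from denom = 100
lemma pvReduce_two (num : Int) :
    pvReduce 100 2 num 100 =
      if (4:Int) ∣ num then (num / 4, 25)
      else if (2:Int) ∣ num then (num / 2, 50) else (num, 100) := by
  split_ifs with h4 h2
  · obtain ⟨k, hk⟩ := h4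
    subst hk
    rw [show (4:Int) * k = 2 * (2 * k) by ring,
        pvReduce_step 99 2 (2*k) 100 (by norm_num) (by norm_num),
        show (100:Int) / 2 = 50 by norm_num,
        pvReduce_step 98 2 k 50 (by norm_num) (by norm_num),
        show (50:Int) / 2 = 25 by norm_num,
        pvReduce_stop 97 2 k 25 (Or.inr (by decide))]
    simp only [Prod.mk.injEq]
    exact ⟨by omega, trivial⟩
  · obtain ⟨k, hk⟩ := h2
    subst hk
    rw [pvReduce_step 99 2 k 100 (by norm_num) (by norm_num),
        show (100:Int) / 2 = 50 by norm_num,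
        pvReduce_stop 98 2 k 50 (Or.inl (by omega))]
    simp only [Prod.mk.injEq]
    exact ⟨by omega, trivial⟩
  · rw [pvReduce_stop 99 2 num 100 (Or.inl h2)]

-- full characterisation of the div=5 pass from any denominator the first pass can leave
lemma pvReduce_five (num d : Int) (hd : d = 100 ∨ d = 50 ∨ d = 25) :
    pvReduce 100 5 num d =
      if (25:Int) ∣ num then (num / 25, d / 25)
      else if (5:Int) ∣ num then (num / 5, d / 5) else (num, d) := by
  have h5d : (5:Int) ∣ d := by rcases hd with rfl | rfl | rfl <;> norm_num
  have h5d' : (5:Int) ∣ d / 5 := by rcases hd with rfl | rfl | rfl <;> norm_num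
  split_ifs with h25 h5
  · obtain ⟨k, hk⟩ := h25
    subst hk
    rw [show (25:Int) * k = 5 * (5 * k) by ring,
        pvReduce_step 99 5 (5*k) d (by norm_num) h5d,
        pvReduce_step 98 5 k (d/5) (by norm_num) h5d',
        show d / 5 / 5 = d / 25 by rcases hd with rfl | rfl | rfl <;> norm_num,
        pvReduce_stop 97 5 k (d/25) (Or.inr (by rcases hd with rfl | rfl | rfl <;> norm_num))]
    simp only [Prod.mk.injEq]
    exact ⟨by omega, trivial⟩
  · obtain ⟨k, hk⟩ := h5
    subst hk
    rw [pvReduce_step 99 5 k d (by norm_num) h5d,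
        pvReduce_stop 98 5 k (d/5) (Or.inl (by omega))]
    simp only [Prod.mk.injEq]
    exact ⟨by omega, trivial⟩
  · rw [pvReduce_stop 99 5 num d (Or.inl h5)]

-- B's Euclid loop computes the gcd
lemma pvGcdLoop_eq_gcd : ∀ (fuel : Nat) (a b : Int), 0 ≤ a → 0 ≤ b → b.natAbs < fuel →
    pvGcdLoop fuel a b = (Int.gcd a b : Int) := by
  intro fuel
  induction fuel with
  | zero => intro a b _ _ h; omega
  | succ f ih =>
    intro a b ha hb hf
    by_cases hb0 : b = 0
    · subst hb0
      have h1 : pvGcdLoop (f+1) a 0 = a := by simp [pvGcdLoop]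
      rw [h1, Int.gcd_zero_right]
      omega
    · have hbpos : 0 < b := by omega
      have hmod : PySem.Int.mod a b = a % b := PySem.Int.mod_eq_emod_of_pos hbpos
      have h1 : 0 ≤ a % b := Int.emod_nonneg a hb0
      have h2 : a % b < b := Int.emod_lt_of_pos a hbpos
      have h3 : pvGcdLoop (f+1) a b = pvGcdLoop f b (a % b) := by
        simp [pvGcdLoop, hb0, hmod]
      rw [h3, ih b (a % b) (le_of_lt hbpos) h1 (by omega),
          show Int.gcd b (a % b) = Int.gcd (a % b) b from Int.gcd_comm b (a % b),
          Int.gcd_emod]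

-- gcd with 100 is decided by divisibility by 4, 2, 25, 5
lemma gcd_hundred (num : Int) :
    (Int.gcd num 100 : Int) =
      (if (4:Int) ∣ num then 4 else if (2:Int) ∣ num then 2 else 1) *
      (if (25:Int) ∣ num then 25 else if (5:Int) ∣ num then 5 else 1) := by
  have hr : Int.gcd num 100 = Int.gcd (num % 100) 100 := (Int.gcd_emod num 100).symm
  have e4 : ((4:Int) ∣ num) ↔ ((4:Int) ∣ num % 100) := by omega
  have e2 : ((2:Int) ∣ num) ↔ ((2:Int) ∣ num % 100) := by omega
  have e25 : ((25:Int) ∣ num) ↔ ((25:Int) ∣ num % 100) := by omega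
  have e5 : ((5:Int) ∣ num) ↔ ((5:Int) ∣ num % 100) := by omega
  rw [hr, if_congr e4 rfl rfl, if_congr e2 rfl rfl, if_congr e25 rfl rfl, if_congr e5 rfl rfl]
  have h0 : 0 ≤ num % 100 := Int.emod_nonneg num (by norm_num)
  have h100 : num % 100 < 100 := Int.emod_lt_of_pos num (by norm_num)
  set r := num % 100 with hrdef
  clear_value r
  clear hrdef hr e4 e2 e25 e5
  interval_cases r <;> decide

-- the whole '%' branch: A's double reduction equals B's divide-by-gcd
lemma percent_branch (num : Int) :
    (pvReduce 100 5 (pvReduce 100 2 num 100).1 (pvReduce 100 2 num 100).2) =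
      (PySem.Int.floordiv num (pvGcdLoop 101 |num| 100),
       PySem.Int.floordiv 100 (pvGcdLoop 101 |num| 100)) := by
  have hg : pvGcdLoop 101 |num| 100 = (Int.gcd num 100 : Int) := by
    rw [pvGcdLoop_eq_gcd 101 |num| 100 (abs_nonneg num) (by norm_num) (by norm_num)]
    congr 1
    simp [Int.gcd, Int.natAbs_abs]
  rw [hg, gcd_hundred, pvReduce_two num]
  by_cases h4 : (4:Int) ∣ num
  · have e25 : ((25:Int) ∣ num / 4) ↔ ((25:Int) ∣ num) := by omega
    have e5 : ((5:Int) ∣ num / 4) ↔ ((5:Int) ∣ num) := by omega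
    rw [if_pos h4, if_pos h4]
    rw [show (pvReduce 100 5 ((num / 4, (25:Int)) : Int × Int).1 ((num / 4, (25:Int)) : Int × Int).2) = pvReduce 100 5 (num/4) 25 from rfl,
        pvReduce_five (num/4) 25 (by norm_num), if_congr e25 rfl rfl, if_congr e5 rfl rfl]
    by_cases h25 : (25:Int) ∣ num
    · rw [if_pos h25, if_pos h25,
          PySem.Int.floordiv_eq_ediv_of_pos (by norm_num), PySem.Int.floordiv_eq_ediv_of_pos (by norm_num)]
      simp only [Prod.mk.injEq]
      constructor <;> omega
    · rw [if_neg h25, if_neg h25]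
      by_cases h5 : (5:Int) ∣ num
      · rw [if_pos h5, if_pos h5,
            PySem.Int.floordiv_eq_ediv_of_pos (by norm_num), PySem.Int.floordiv_eq_ediv_of_pos (by norm_num)]
        simp only [Prod.mk.injEq]
        constructor <;> omega
      · rw [if_neg h5, if_neg h5,
            PySem.Int.floordiv_eq_ediv_of_pos (by norm_num), PySem.Int.floordiv_eq_ediv_of_pos (by norm_num)]
        simp only [Prod.mk.injEq]
        constructor <;> omega
  · by_cases h2 : (2:Int) ∣ num
    · have e25 : ((25:Int) ∣ num / 2) ↔ ((25:Int) ∣ num) := by omega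
      have e5 : ((5:Int) ∣ num / 2) ↔ ((5:Int) ∣ num) := by omega
      rw [if_neg h4, if_neg h4, if_pos h2, if_pos h2]
      rw [show (pvReduce 100 5 ((num / 2, (50:Int)) : Int × Int).1 ((num / 2, (50:Int)) : Int × Int).2) = pvReduce 100 5 (num/2) 50 from rfl,
          pvReduce_five (num/2) 50 (by norm_num), if_congr e25 rfl rfl, if_congr e5 rfl rfl]
      by_cases h25 : (25:Int) ∣ num
      · rw [if_pos h25, if_pos h25,
            PySem.Int.floordiv_eq_ediv_of_pos (by norm_num), PySem.Int.floordiv_eq_ediv_of_pos (by norm_num)]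
        simp only [Prod.mk.injEq]
        constructor <;> omega
      · rw [if_neg h25, if_neg h25]
        by_cases h5 : (5:Int) ∣ num
        · rw [if_pos h5, if_pos h5,
              PySem.Int.floordiv_eq_ediv_of_pos (by norm_num), PySem.Int.floordiv_eq_ediv_of_pos (by norm_num)]
          simp only [Prod.mk.injEq]
          constructor <;> omega
        · rw [if_neg h5, if_neg h5,
              PySem.Int.floordiv_eq_ediv_of_pos (by norm_num), PySem.Int.floordiv_eq_ediv_of_pos (by norm_num)]
          simp only [Prod.mk.injEq]
          constructor <;> omega
    · rw [if_neg h4, if_neg h4, if_neg h2, if_neg h2]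
      rw [show (pvReduce 100 5 ((num, (100:Int)) : Int × Int).1 ((num, (100:Int)) : Int × Int).2) = pvReduce 100 5 num 100 from rfl,
          pvReduce_five num 100 (by norm_num)]
      by_cases h25 : (25:Int) ∣ num
      · rw [if_pos h25, if_pos h25,
            PySem.Int.floordiv_eq_ediv_of_pos (by norm_num), PySem.Int.floordiv_eq_ediv_of_pos (by norm_num)]
        simp only [Prod.mk.injEq]
        constructor <;> omega
      · rw [if_neg h25, if_neg h25]
        by_cases h5 : (5:Int) ∣ num
        · rw [if_pos h5, if_pos h5,
              PySem.Int.floordiv_eq_ediv_of_pos (by norm_num), PySem.Int.floordiv_eq_ediv_of_pos (by norm_num)]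
          simp only [Prod.mk.injEq]
          constructor <;> omega
        · rw [if_neg h5, if_neg h5,
              PySem.Int.floordiv_eq_ediv_of_pos (by norm_num), PySem.Int.floordiv_eq_ediv_of_pos (by norm_num)]
          simp only [Prod.mk.injEq]
          constructor <;> omega

-- ===== VERDICT (by name: the statement is the Claim_ definition above) =====
theorem parse_scaling_value_spec : Claim_equal_parse_scaling_value := by
  intro v _hdom hpre
  unfold Spec_parse_scaling_value parse_scaling_value parse_scaling_value_alt
  by_cases hv : v = ""
  · simp [hv]
  · rw [if_neg hv, if_neg hv]
    by_cases hp : PySem.Str.endswith v "%" = true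
    · rw [if_pos hp, if_pos hp]
      cases hnum : PySem.Int.ofStr? (PySem.Str.slice v none (some (-1))) with
      | none => rfl
      | some num => simpa using congrArg some (percent_branch num)
    · rw [if_neg hp, if_neg hp]
      rcases hpre with hv' | hpre'
      · exact absurd hv' hv
      · rw [if_neg (by exact hp)] at hpre'
        revert hpre'
        cases hm : ((PySem.Str.splitMax? (PySem.Str.replace (PySem.Str.replace v "/" ":") "," ":") ":" 1).getD []).mapM PySem.Int.ofStr? with
        | none => intro h; exact absurd h (by simp [pvPreRatio])
        | some values =>
          intro hpre'
          match values with
          | [] => exact absurd hpre' (by simp [pvPreRatio])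
          | [a] =>
            have ha : 0 < a := by simpa [pvPreRatio] using hpre'
            have h1a : (1:Int) ≤ a := by omega
            simp [PySem.List.slice_from_neg_ofNat _ 2 (by norm_num), pvUnpack2,
              PySem.List.pyGet?, PySem.List.pyIdx?, ha, h1a]
          | [a, b] =>
            have hab : 0 < a ∧ 0 < b ∧ a ≤ b := by simpa [pvPreRatio] using hpre'
            simp [PySem.List.slice_from_neg_ofNat _ 2 (by norm_num), pvUnpack2,
              PySem.List.pyGet?, PySem.List.pyIdx?, hab.1, hab.2.1, hab.2.2]
          | _ :: _ :: _ :: _ => exact absurd hpre' (by simp [pvPreRatio])
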